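-- pv_equiv track=rewrite | github.com/Whatapalaver/aoc_21 | aoc/day10/part2.py | score_unmatched_openers
-- ===== SOURCE A (Python) =====
-- def score_unmatched_openers(matching_pairs, unmatched_openers):
--     points = {")": 1, "]": 2, "}": 3, ">": 4}
--     missing_closers = [matching_pairs[opener] for opener in unmatched_openers]
--     missing_closers.reverse()
--     total_score = 0
--     for closer in missing_closers:
--         total_score *= 5
--         total_score += points[closer]
--     return total_score
-- ===== SOURCE B (Python) =====
-- def score_unmatched_openers(matching_pairs, unmatched_openers):
--     points = {")": 1, "]": 2, "}": 3, ">": 4}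
--     total = 0
--     mult = 1
--     for opener in unmatched_openers:
--         total += points[matching_pairs[opener]] * mult
--         mult *= 5
--     return total
-- ===== Notes on version B (the rewrite author's own statement) =====
-- stated objective: simpler
-- what changed: Replaces the intermediate closer list, its in-place reverse and the reversed Horner fold by a single forward pass that keeps a place-value multiplier and adds points[matching_pairs[opener]] * mult directly.
import Mathlib
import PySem

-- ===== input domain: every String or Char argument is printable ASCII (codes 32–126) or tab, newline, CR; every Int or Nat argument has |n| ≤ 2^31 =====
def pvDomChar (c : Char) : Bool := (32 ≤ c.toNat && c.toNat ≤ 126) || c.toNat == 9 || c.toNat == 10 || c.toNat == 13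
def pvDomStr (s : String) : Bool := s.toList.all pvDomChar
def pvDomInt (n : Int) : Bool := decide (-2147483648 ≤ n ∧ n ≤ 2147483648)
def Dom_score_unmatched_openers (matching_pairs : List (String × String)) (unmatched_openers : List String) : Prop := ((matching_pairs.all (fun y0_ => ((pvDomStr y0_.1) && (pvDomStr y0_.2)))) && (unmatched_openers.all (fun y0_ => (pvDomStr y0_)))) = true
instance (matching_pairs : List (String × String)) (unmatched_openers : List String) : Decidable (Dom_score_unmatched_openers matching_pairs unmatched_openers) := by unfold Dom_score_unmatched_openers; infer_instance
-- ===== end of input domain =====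

-- B drops the intermediate closer list and the reversal: one forward pass with a
-- place-value multiplier instead of A's reversed Horner fold (objective: simpler).


-- shared helpers: first-match lookup in the matching_pairs association list (Python dict[opener]),
-- and the literal points dict; both return Option, none = KeyError (excluded by Pre_)
def pvLookup (mp : List (String × String)) (k : String) : Option String :=
  (mp.find? (fun p => p.1 == k)).map (·.2)

def pvPointsGet (c : String) : Option Int :=
  (PySem.Dict.ofList [((")" : String), (1 : Int)), ("]", 2), ("}", 3), (">", 4)]).get? c

-- ===== PORT A =====
-- builds missing_closers, reverses it, then the Horner loop; .getD defaults are
-- only reached on inputs where Python raises KeyError, which Pre_ excludes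
def score_unmatched_openers (matching_pairs : List (String × String)) (unmatched_openers : List String) : Int :=
  let missing_closers := unmatched_openers.map (fun o => (pvLookup matching_pairs o).getD "")
  let missing_closers := missing_closers.reverse
  missing_closers.foldl (fun total_score closer => total_score * 5 + (pvPointsGet closer).getD 0) 0

-- ===== PORT B =====
-- forward pass carrying (total, mult)
def score_unmatched_openers_alt (matching_pairs : List (String × String)) (unmatched_openers : List String) : Int :=
  (unmatched_openers.foldl
    (fun (st : Int × Int) opener =>
      (st.1 + (pvPointsGet ((pvLookup matching_pairs opener).getD "")).getD 0 * st.2, st.2 * 5))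
    ((0 : Int), (1 : Int))).1

-- ===== PRECONDITION & SPEC =====
-- Pre_ excludes exactly the inputs where Python A raises KeyError: an opener absent
-- from matching_pairs, or one whose closer is not one of ")", "]", "}", ">"
def Pre_score_unmatched_openers (matching_pairs : List (String × String)) (unmatched_openers : List String) : Prop :=
  (unmatched_openers.all (fun o => ((pvLookup matching_pairs o).bind pvPointsGet).isSome)) = true
instance (matching_pairs : List (String × String)) (unmatched_openers : List String) : Decidable (Pre_score_unmatched_openers matching_pairs unmatched_openers) := by unfold Pre_score_unmatched_openers; infer_instance

def pvWitness_score_unmatched_openers : (List (String × String)) × List String :=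
  ([("(", ")"), ("[", "]"), ("{", "}"), ("<", ">")], ["(", "[", "<"])

def Spec_score_unmatched_openers (matching_pairs : List (String × String)) (unmatched_openers : List String) (out : Int) : Prop := out = score_unmatched_openers_alt matching_pairs unmatched_openers
instance (matching_pairs : List (String × String)) (unmatched_openers : List String) (out : Int) : Decidable (Spec_score_unmatched_openers matching_pairs unmatched_openers out) := by unfold Spec_score_unmatched_openers; infer_instance

-- ===== CLAIM (what is proved, stated in full; the proofs are below) =====
def Claim_equal_score_unmatched_openers : Prop := ∀ (matching_pairs : List (String × String)) (unmatched_openers : List String), Dom_score_unmatched_openers matching_pairs unmatched_openers → Pre_score_unmatched_openers matching_pairs unmatched_openers → Spec_score_unmatched_openers matching_pairs unmatched_openers (score_unmatched_openers matching_pairs unmatched_openers)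

-- ===== LEMMAS AND PROOFS =====

-- the common base-5 value Σ f lᵢ · 5ⁱ, as a structural recursion
def pvHsum (f : String → Int) : List String → Int
  | [] => 0
  | c :: l => f c + 5 * pvHsum f l

theorem pvRevHorner (f : String → Int) (l : List String) :
    l.reverse.foldl (fun t c => t * 5 + f c) 0 = pvHsum f l := by
  induction l with
  | nil => simp [pvHsum]
  | cons c l ih =>
    simp [List.foldl_append, pvHsum, ih]
    ring

theorem pvFwd (f : String → Int) (l : List String) :
    ∀ (s m : Int),
      (l.foldl (fun (st : Int × Int) o => (st.1 + f o * st.2, st.2 * 5)) (s, m)).1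
        = s + m * pvHsum f l := by
  induction l with
  | nil => intro s m; simp [pvHsum]
  | cons c l ih =>
    intro s m
    simp only [List.foldl_cons, pvHsum, ih]
    ring

theorem pvHsum_map (g : String → Int) (h : String → String) (l : List String) :
    pvHsum g (l.map h) = pvHsum (fun o => g (h o)) l := by
  induction l with
  | nil => rfl
  | cons c l ih => simp [pvHsum, ih]

-- ===== VERDICT (by name: the statement is the Claim_ definition above) =====
theorem score_unmatched_openers_spec : Claim_equal_score_unmatched_openers := by
  intro mp uo _ _
  unfold Spec_score_unmatched_openers score_unmatched_openers score_unmatched_openers_alt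
  rw [pvRevHorner, pvHsum_map, pvFwd]
  ring
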